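-- pv_equiv track=rewrite | github.com/commons-research/ontology-weaver | scripts/export_reconciled_mappings.py | build_group_rows
-- ===== SOURCE A (Python) =====
-- def clean(value: str) -> str:
--     """Return stripped string with None-safe fallback."""
--     return (value or "").strip()
--
-- def build_group_rows(mapping_rows: list[dict[str, str]]) -> list[dict[str, str]]:
--     """Group source->canonical mappings by canonical term."""
--     groups: dict[tuple[str, str, str], list[dict[str, str]]] = {}
--     for row in mapping_rows:
--         key = (
--             clean(row.get("canonical_term_iri", "")),
--             clean(row.get("canonical_term_label", "")),
--             clean(row.get("canonical_term_source", "")),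
--         )
--         groups.setdefault(key, []).append(row)
--
--     out: list[dict[str, str]] = []
--     for key in sorted(groups.keys()):
--         canonical_iri, canonical_label, canonical_source = key
--         group_rows = groups[key]
--         source_pairs = sorted(
--             {
--                 (
--                     clean(item.get("source_term_source", "")),
--                     clean(item.get("source_term_iri", "")),
--                     clean(item.get("source_term_label", "")),
--                 )
--                 for item in group_rows
--             }
--         )
--         out.append(
--             {
--                 "canonical_term_iri": canonical_iri,
--                 "canonical_term_label": canonical_label,
--                 "canonical_term_source": canonical_source,
--                 "mapped_term_count": str(len(source_pairs)),
--                 "mapped_terms": " | ".join(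
--                     f"{src}:{iri}:{label}" for src, iri, label in source_pairs
--                 ),
--                 "alignment_ids": " | ".join(
--                     sorted({clean(item.get("alignment_id", "")) for item in group_rows})
--                 ),
--             }
--         )
--     return out
-- ===== SOURCE B (Python) =====
-- def clean(value: str) -> str:
--     """Return stripped string with None-safe fallback."""
--     return (value or "").strip()
--
--
-- def _key_of(row):
--     return (
--         clean(row.get("canonical_term_iri", "")),
--         clean(row.get("canonical_term_label", "")),
--         clean(row.get("canonical_term_source", "")),
--     )
--
--
-- def _group_row(mapping_rows, key):
--     group = [r for r in mapping_rows if _key_of(r) == key]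
--     pairs = sorted({
--         (
--             clean(r.get("source_term_source", "")),
--             clean(r.get("source_term_iri", "")),
--             clean(r.get("source_term_label", "")),
--         )
--         for r in group
--     })
--     iri, label, source = key
--     return {
--         "canonical_term_iri": iri,
--         "canonical_term_label": label,
--         "canonical_term_source": source,
--         "mapped_term_count": str(len(pairs)),
--         "mapped_terms": " | ".join(f"{src}:{i}:{lbl}" for src, i, lbl in pairs),
--         "alignment_ids": " | ".join(sorted({clean(r.get("alignment_id", "")) for r in group})),
--     }
--
--
-- def build_group_rows(mapping_rows):
--     """Group source->canonical mappings by canonical term: sorted distinct keys + per-key filter, no dict accumulator."""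
--     return [_group_row(mapping_rows, key)
--             for key in sorted({_key_of(r) for r in mapping_rows})]
-- ===== Notes on version B (the rewrite author's own statement) =====
-- stated objective: alternative
-- what changed: Replaces A's dict-of-lists accumulation (setdefault/append, then a sort over the dict's keys) with sorting the distinct cleaned key tuples once and recovering each group by a per-key filter pass over the input, with no dict at all.
import Mathlib
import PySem

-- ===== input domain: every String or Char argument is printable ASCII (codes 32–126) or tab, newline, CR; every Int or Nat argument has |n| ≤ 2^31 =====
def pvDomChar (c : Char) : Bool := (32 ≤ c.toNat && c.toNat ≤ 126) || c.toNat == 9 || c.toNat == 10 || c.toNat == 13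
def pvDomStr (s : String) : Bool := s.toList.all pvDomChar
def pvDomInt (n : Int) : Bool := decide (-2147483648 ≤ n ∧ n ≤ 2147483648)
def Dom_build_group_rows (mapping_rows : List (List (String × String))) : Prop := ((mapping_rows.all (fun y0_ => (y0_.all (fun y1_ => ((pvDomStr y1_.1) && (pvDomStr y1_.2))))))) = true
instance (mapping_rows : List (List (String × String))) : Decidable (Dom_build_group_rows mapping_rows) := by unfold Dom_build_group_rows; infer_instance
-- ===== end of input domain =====

-- B replaces A's dict-of-lists accumulation with a sort of the distinct cleaned key tuples and a
-- per-key filter pass (objective: alternative decomposition, same output).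

-- shared transliterations of row-level expressions both Pythons contain verbatim
-- clean(value): '(value or "").strip()'
def pyClean (value : String) : String := PySem.Str.strip (if value = "" then "" else value)
-- Python's lexicographic order on a 3-tuple of strings, as a sort key
def lexKey3 (k : String × String × String) : String ×ₗ (String ×ₗ String) := toLex (k.1, toLex (k.2.1, k.2.2))
-- the cleaned canonical-term key tuple (A builds it inline, B's _key_of)
def keyOf (row : List (String × String)) : String × String × String :=
  (pyClean ((PySem.Dict.mk row).getD "canonical_term_iri" ""),
   pyClean ((PySem.Dict.mk row).getD "canonical_term_label" ""),
   pyClean ((PySem.Dict.mk row).getD "canonical_term_source" ""))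
-- the cleaned source-term tuple (identical set-comprehension element in both Pythons)
def pairOf (item : List (String × String)) : String × String × String :=
  (pyClean ((PySem.Dict.mk item).getD "source_term_source" ""),
   pyClean ((PySem.Dict.mk item).getD "source_term_iri" ""),
   pyClean ((PySem.Dict.mk item).getD "source_term_label" ""))

-- ===== PORT A =====
-- 'groups.setdefault(key, []).append(row)' mutates the stored list in place: d[key] = d.get(key, []) + [row], i.e. Dict.modify
def build_group_rows (mapping_rows : List (List (String × String))) : List (List (String × String)) :=
  let groups : PySem.Dict (String × String × String) (List (List (String × String))) :=
    mapping_rows.foldl (fun g row => g.modify (keyOf row) [] (fun v => v ++ [row])) PySem.Dict.empty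
  (PySem.List.sorted groups.keys lexKey3 false).foldl (fun out key =>
    let group_rows := groups.getD key []
    let source_pairs := PySem.List.sorted (PySem.Set.ofList (group_rows.map pairOf)) lexKey3 false
    out ++ [[("canonical_term_iri", key.1),
             ("canonical_term_label", key.2.1),
             ("canonical_term_source", key.2.2),
             ("mapped_term_count", PySem.Int.toStr (source_pairs.length : Int)),
             ("mapped_terms", PySem.Str.join " | "
               (source_pairs.map (fun p => p.1 ++ ":" ++ p.2.1 ++ ":" ++ p.2.2))),
             ("alignment_ids", PySem.Str.join " | "
               (PySem.List.sorted (PySem.Set.ofList (group_rows.map (fun item => pyClean ((PySem.Dict.mk item).getD "alignment_id" "")))) (fun x => x) false))]]) []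

-- ===== PORT B =====
-- B's _group_row: one output row for a key, from a fresh filter over all mapping rows
def groupRow (mapping_rows : List (List (String × String))) (key : String × String × String) : List (String × String) :=
  let group := mapping_rows.filter (fun r => keyOf r == key)
  let pairs := PySem.List.sorted (PySem.Set.ofList (group.map pairOf)) lexKey3 false
  [("canonical_term_iri", key.1),
   ("canonical_term_label", key.2.1),
   ("canonical_term_source", key.2.2),
   ("mapped_term_count", PySem.Int.toStr (pairs.length : Int)),
   ("mapped_terms", PySem.Str.join " | "
     (pairs.map (fun p => p.1 ++ ":" ++ p.2.1 ++ ":" ++ p.2.2))),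
   ("alignment_ids", PySem.Str.join " | "
     (PySem.List.sorted (PySem.Set.ofList (group.map (fun r => pyClean ((PySem.Dict.mk r).getD "alignment_id" "")))) (fun x => x) false))]

def build_group_rows_alt (mapping_rows : List (List (String × String))) : List (List (String × String)) :=
  (PySem.List.sorted (PySem.Set.ofList (mapping_rows.map keyOf)) lexKey3 false).map
    (groupRow mapping_rows)

-- ===== PRECONDITION & SPEC =====
def Spec_build_group_rows (mapping_rows : List (List (String × String))) (out : List (List (String × String))) : Prop := out = build_group_rows_alt mapping_rows
instance (mapping_rows : List (List (String × String))) (out : List (List (String × String))) : Decidable (Spec_build_group_rows mapping_rows out) := by unfold Spec_build_group_rows; infer_instance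

-- ===== CLAIM (what is proved, stated in full; the proofs are below) =====
def Claim_equal_build_group_rows : Prop := ∀ (mapping_rows : List (List (String × String))), Dom_build_group_rows mapping_rows → Spec_build_group_rows mapping_rows (build_group_rows mapping_rows)

-- ===== LEMMAS AND PROOFS =====

-- A's grouping dict, named for the lemmas
def groupsOf (mapping_rows : List (List (String × String))) : PySem.Dict (String × String × String) (List (List (String × String))) :=
  mapping_rows.foldl (fun g row => g.modify (keyOf row) [] (fun v => v ++ [row])) PySem.Dict.empty

-- the dict's key list is the distinct keys in first-occurrence order
theorem keys_groupsOf (mapping_rows : List (List (String × String))) :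
    (groupsOf mapping_rows).keys = PySem.Set.ofList (mapping_rows.map keyOf) := by
  unfold groupsOf
  rw [PySem.Dict.keys_foldl_modify_key mapping_rows keyOf [] (fun _ x v => v ++ [x]) PySem.Dict.empty]
  simp [PySem.Set.update_nil_left]

-- each stored group is exactly the filter of the input by that key
theorem getD_groupsOf (mapping_rows : List (List (String × String))) (key : String × String × String) :
    (groupsOf mapping_rows).getD key [] = mapping_rows.filter (fun r => keyOf r == key) := by
  unfold groupsOf
  have h : mapping_rows.foldl (fun g row => g.modify (keyOf row) [] (fun v => v ++ [row])) PySem.Dict.empty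
      = (mapping_rows.map (fun r => (keyOf r, r))).foldl (fun g p => g.modify p.1 [] (fun v => v ++ [p.2])) PySem.Dict.empty := by
    rw [List.foldl_map]
  rw [h, PySem.Dict.getD_foldl_modify_append]
  simp [List.filter_map, Function.comp_def]

-- A's loop body over one sorted key, named for the fold lemma
def abodyRow (mapping_rows : List (List (String × String))) (key : String × String × String) : List (String × String) :=
  let group_rows := (groupsOf mapping_rows).getD key []
  let source_pairs := PySem.List.sorted (PySem.Set.ofList (group_rows.map pairOf)) lexKey3 false
  [("canonical_term_iri", key.1),
   ("canonical_term_label", key.2.1),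
   ("canonical_term_source", key.2.2),
   ("mapped_term_count", PySem.Int.toStr (source_pairs.length : Int)),
   ("mapped_terms", PySem.Str.join " | "
     (source_pairs.map (fun p => p.1 ++ ":" ++ p.2.1 ++ ":" ++ p.2.2))),
   ("alignment_ids", PySem.Str.join " | "
     (PySem.List.sorted (PySem.Set.ofList (group_rows.map (fun item => pyClean ((PySem.Dict.mk item).getD "alignment_id" "")))) (fun x => x) false))]

theorem build_group_rows_eq_alt (mapping_rows : List (List (String × String))) :
    build_group_rows mapping_rows = build_group_rows_alt mapping_rows := by
  show (PySem.List.sorted (groupsOf mapping_rows).keys lexKey3 false).foldl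
      (fun out key => out ++ [abodyRow mapping_rows key]) [] = _
  rw [PySem.List.foldl_append_singleton_eq_map (abodyRow mapping_rows)]
  rw [keys_groupsOf]
  unfold build_group_rows_alt
  refine List.map_congr_left (fun key _ => ?_)
  simp only [abodyRow, groupRow, getD_groupsOf]

-- ===== VERDICT (by name: the statement is the Claim_ definition above) =====
theorem build_group_rows_spec : Claim_equal_build_group_rows := by
  intro mapping_rows _
  unfold Spec_build_group_rows
  exact build_group_rows_eq_alt mapping_rows
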